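-- pv_equiv track=rewrite | github.com/jaswindersingh2/SPOT-RNA | utils/utils.py | multiplets_pairs
-- ===== SOURCE A (Python) =====
-- def flatten(x):
--     result = []
--     for el in x:
--         if hasattr(el, "__iter__") and not isinstance(el, str):
--             result.extend(flatten(el))
--         else:
--             result.append(el)
--     return result
--
-- def multiplets_pairs(pred_pairs):
--
--     pred_pair = [i[:2] for i in pred_pairs]
--     temp_list = flatten(pred_pair)
--     temp_list.sort()
--     new_list = sorted(set(temp_list))
--     dup_list = []
--     for i in range(len(new_list)):
--         if (temp_list.count(new_list[i]) > 1):
--             dup_list.append(new_list[i])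
--
--     dub_pairs = []
--     for e in pred_pair:
--         if e[0] in dup_list:
--             dub_pairs.append(e)
--         elif e[1] in dup_list:
--             dub_pairs.append(e)
--
--     temp3 = []
--     for i in dup_list:
--         temp4 = []
--         for k in dub_pairs:
--             if i in k:
--                 temp4.append(k)
--         temp3.append(temp4)
--
--     return temp3
-- ===== SOURCE B (Python) =====
-- def multiplets_pairs(pred_pairs):
--     pairs = [i[:2] for i in pred_pairs]
--     counts = {}
--     for p in pairs:
--         for x in p:
--             counts[x] = counts.get(x, 0) + 1
--     dup_list = sorted(v for v in counts if counts[v] > 1)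
--     buckets = {v: [] for v in dup_list}
--     for k in pairs:
--         seen = []
--         for x in k:
--             if x in buckets and x not in seen:
--                 buckets[x].append(k)
--                 seen.append(x)
--     return [buckets[v] for v in dup_list]
-- ===== Notes on version B (the rewrite author's own statement) =====
-- stated objective: alternative
-- what changed: Replaces A's flatten/sort/count rescans and the per-duplicate rescan of all pairs with one dict counting pass plus one bucket-filling pass over the pairs, reading the groups out of the buckets.
import Mathlib
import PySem

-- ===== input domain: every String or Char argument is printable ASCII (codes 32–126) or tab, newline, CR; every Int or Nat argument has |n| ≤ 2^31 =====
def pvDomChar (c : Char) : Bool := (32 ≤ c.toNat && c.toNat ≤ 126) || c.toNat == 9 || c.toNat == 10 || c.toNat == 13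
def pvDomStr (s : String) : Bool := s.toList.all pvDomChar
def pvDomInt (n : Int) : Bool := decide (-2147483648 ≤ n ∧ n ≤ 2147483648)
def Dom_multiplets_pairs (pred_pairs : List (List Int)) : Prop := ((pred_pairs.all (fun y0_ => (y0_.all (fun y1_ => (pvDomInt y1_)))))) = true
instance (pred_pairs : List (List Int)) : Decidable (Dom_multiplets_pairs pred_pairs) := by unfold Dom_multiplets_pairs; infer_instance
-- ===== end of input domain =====

-- B replaces the nested "for each duplicated value, rescan all pairs" grouping by one
-- dict counting pass plus one bucket-filling pass over the pairs (objective: alternative,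
-- a different grouping strategy of similar size).

-- ===== PORT A =====
-- flatten(x) on a list of int-lists: inner elements are ints, so the inner flatten call
-- just copies the inner list element by element (ints are not iterable).
def pvFlattenInner (el : List Int) : List Int :=
  el.foldl (fun acc e => acc ++ [e]) []

def pvFlatten (x : List (List Int)) : List Int :=
  x.foldl (fun acc el => acc ++ pvFlattenInner el) []

def multiplets_pairs (pred_pairs : List (List Int)) : List (List (List Int)) :=
  let pred_pair := pred_pairs.map (fun i => PySem.List.slice i none (some 2))
  let temp_list := PySem.List.sorted (pvFlatten pred_pair) (fun x => x)
  let new_list := PySem.List.sorted (PySem.Set.ofList temp_list) (fun x => x)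
  let dup_list := (PySem.List.pyRange 0 (PySem.List.len new_list)).foldl
      (fun acc i =>
        if temp_list.count (PySem.List.pyGetD new_list i 0) > 1
        then acc ++ [PySem.List.pyGetD new_list i 0] else acc) []
  -- e[0] / e[1]: safe under Pre_ (the first branch fires whenever e has fewer than 2 elements);
  -- pyGetD's default is never observed inside Pre_.
  let dub_pairs := pred_pair.foldl
      (fun acc e =>
        if dup_list.contains (PySem.List.pyGetD e 0 0) then acc ++ [e]
        else if dup_list.contains (PySem.List.pyGetD e 1 0) then acc ++ [e]
        else acc) []
  dup_list.foldl (fun t3 i =>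
      t3 ++ [dub_pairs.foldl (fun t4 k => if k.contains i then t4 ++ [k] else t4) []]) []

-- ===== PORT B =====
-- the inner "for x in k: if x in buckets and x not in seen: …" loop of Source B
def pvBucketPair (d : PySem.Dict Int (List (List Int))) (k : List Int) :
    PySem.Dict Int (List (List Int)) :=
  (k.foldl
    (fun (st : PySem.Dict Int (List (List Int)) × List Int) x =>
      if st.1.contains x && !(st.2.contains x)
      then (st.1.modify x [] (fun l => l ++ [k]), st.2 ++ [x])
      else st)
    (d, ([] : List Int))).1

def multiplets_pairs_alt (pred_pairs : List (List Int)) : List (List (List Int)) :=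
  let pairs := pred_pairs.map (fun i => PySem.List.slice i none (some 2))
  let counts := pairs.foldl
      (fun d p => p.foldl (fun d x => d.insert x (d.getD x 0 + 1)) d)
      (PySem.Dict.empty : PySem.Dict Int Int)
  let dup_list := PySem.List.sorted
      (counts.keys.filter (fun v => counts.getD v 0 > 1)) (fun x => x)
  let buckets0 := dup_list.foldl
      (fun d v => d.insert v ([] : List (List Int)))
      (PySem.Dict.empty : PySem.Dict Int (List (List Int)))
  let buckets := pairs.foldl pvBucketPair buckets0
  dup_list.map (fun v => buckets.getD v [])

-- ===== PRECONDITION & SPEC =====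
-- Pre_ excludes exactly the inputs on which Python A raises IndexError: pairs shorter than
-- two elements whose first element is missing or not duplicated, where A indexes past the end.
def Pre_multiplets_pairs (pred_pairs : List (List Int)) : Prop :=
  ∀ e ∈ pred_pairs, e ≠ [] ∧
    (2 ≤ e.length ∨ 1 < (pred_pairs.map (fun i => i.take 2)).flatten.count (e.headD 0))
instance (pred_pairs : List (List Int)) : Decidable (Pre_multiplets_pairs pred_pairs) := by
  unfold Pre_multiplets_pairs; infer_instance

def pvWitness_multiplets_pairs : List (List Int) := [[1, 2], [1, 3]]

def Spec_multiplets_pairs (pred_pairs : List (List Int)) (out : List (List (List Int))) : Prop :=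
  out = multiplets_pairs_alt pred_pairs
instance (pred_pairs : List (List Int)) (out : List (List (List Int))) :
    Decidable (Spec_multiplets_pairs pred_pairs out) := by
  unfold Spec_multiplets_pairs; infer_instance

-- ===== CLAIM (what is proved, stated in full; the proofs are below) =====
def Claim_equal_multiplets_pairs : Prop :=
  ∀ (pred_pairs : List (List Int)), Dom_multiplets_pairs pred_pairs →
    Pre_multiplets_pairs pred_pairs →
    Spec_multiplets_pairs pred_pairs (multiplets_pairs pred_pairs)

-- ===== LEMMAS AND PROOFS =====

-- proof-local abbreviations: the common shape both ports reduce to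
def pvPairs (pp : List (List Int)) : List (List Int) := pp.map (fun i => i.take 2)
def pvFlat (pp : List (List Int)) : List Int := (pvPairs pp).flatten
def pvP (pp : List (List Int)) : Int → Bool := fun v => decide ((pvFlat pp).count v > 1)
def pvDup (pp : List (List Int)) : List Int :=
  PySem.List.sorted ((PySem.Set.ofList (pvFlat pp)).filter (pvP pp)) (fun x => x)
def pvOut (pp : List (List Int)) : List (List (List Int)) :=
  (pvDup pp).map (fun v => (pvPairs pp).filter (fun k => k.contains v))

theorem pv_slice2 (i : List Int) : PySem.List.slice i none (some 2) = i.take 2 := by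
  rw [PySem.List.slice_to i (by norm_num)]
  rfl

theorem pv_foldl_filter_prop {α : Type} (p : α → Prop) [DecidablePred p] :
    ∀ (l acc : List α),
      l.foldl (fun acc x => if p x then acc ++ [x] else acc) acc
        = acc ++ l.filter (fun x => decide (p x)) := by
  intro l; induction l with
  | nil => intro acc; simp
  | cons x l ih =>
    intro acc
    by_cases h : p x <;> simp [h, ih]

theorem pv_foldl_filter_or {α : Type} (p q : α → Bool) :
    ∀ (l acc : List α),
      l.foldl (fun acc x => if p x then acc ++ [x] else if q x then acc ++ [x] else acc) acc
        = acc ++ l.filter (fun x => p x || q x) := by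
  intro l; induction l with
  | nil => intro acc; simp
  | cons x l ih =>
    intro acc
    cases hp : p x <;> cases hq : q x <;> simp [hp, hq, ih]

theorem pv_flattenInner_eq (el : List Int) : pvFlattenInner el = el := by
  unfold pvFlattenInner
  rw [PySem.List.foldl_append_singleton_eq_map (fun e => e)]
  simp

theorem pv_flatten_aux : ∀ (x : List (List Int)) (acc : List Int),
    x.foldl (fun acc el => acc ++ pvFlattenInner el) acc = acc ++ x.flatten := by
  intro x; induction x with
  | nil => intro acc; simp
  | cons el x ih => intro acc; rw [List.foldl_cons, ih]; simp [pv_flattenInner_eq]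

theorem pv_flatten_eq (x : List (List Int)) : pvFlatten x = x.flatten := by
  unfold pvFlatten; rw [pv_flatten_aux]; simp

theorem pv_pairs_len (pp : List (List Int)) : ∀ k ∈ pvPairs pp, k.length ≤ 2 := by
  intro k hk
  obtain ⟨i, _, rfl⟩ := List.mem_map.mp hk
  simp [List.length_take]

-- A's range(len(new_list)) loop is a filter of new_list
theorem pv_range_loop (xs temp : List Int) :
    (PySem.List.pyRange 0 (PySem.List.len xs)).foldl
        (fun acc i => if temp.count (PySem.List.pyGetD xs i 0) > 1
          then acc ++ [PySem.List.pyGetD xs i 0] else acc) []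
      = xs.filter (fun v => decide (temp.count v > 1)) := by
  rw [PySem.List.foldl_pyRange_pyGetD xs 0
    (fun acc x => if temp.count x > 1 then acc ++ [x] else acc) [] (le_refl 0)]
  rw [show ((0 : Int).toNat) = 0 from rfl, List.drop_zero, pv_foldl_filter_prop]
  simp

-- the two sorted, duplicate-filtered lists coincide
theorem pv_dup_eq (flat : List Int) (p : Int → Bool) :
    (PySem.List.sorted (PySem.Set.ofList (PySem.List.sorted flat (fun x => x))) (fun x => x)).filter p
      = PySem.List.sorted ((PySem.Set.ofList flat).filter p) (fun x => x) := by
  have hpw : List.Pairwise (fun a b => a < b)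
      ((PySem.List.sorted (PySem.Set.ofList (PySem.List.sorted flat (fun x => x))) (fun x => x)).filter p) :=
    (PySem.List.sorted_ofList_pairwise_lt _).filter p
  have hperm : ((PySem.List.sorted (PySem.Set.ofList (PySem.List.sorted flat (fun x => x))) (fun x => x)).filter p).Perm
      (((PySem.Set.ofList flat).filter p)) := by
    refine List.Perm.filter p ?_
    refine (PySem.List.sorted_perm _ _ _).trans ?_
    exact (List.perm_ext_iff_of_nodup (PySem.Set.nodup_ofList _) (PySem.Set.nodup_ofList _)).mpr
      (fun a => by simp [PySem.Set.mem_ofList, PySem.List.mem_sorted])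
  exact (PySem.List.sorted_eq_of_perm_of_pairwise_lt _ _ _ hperm hpw).symm

-- ---- A-side characterization ----
theorem pv_A (pp : List (List Int)) : multiplets_pairs pp = pvOut pp := by
  unfold multiplets_pairs
  simp only [pv_slice2]
  rw [show List.map (fun i => List.take 2 i) pp = pvPairs pp from rfl]
  rw [pv_flatten_eq]
  rw [show (pvPairs pp).flatten = pvFlat pp from rfl]
  rw [pv_range_loop]
  have hcnt : ∀ w : Int, (PySem.List.sorted (pvFlat pp) (fun x => x)).count w = (pvFlat pp).count w :=
    fun w => (PySem.List.sorted_perm (pvFlat pp) (fun x => x) false).count_eq w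
  simp only [hcnt]
  rw [pv_dup_eq]
  rw [pv_foldl_filter_or]
  simp only [List.nil_append]
  simp only [PySem.List.foldl_append_if, PySem.List.foldl_append_singleton_eq_map,
    List.nil_append, List.map_id_fun', id]
  unfold pvOut
  refine List.map_congr_left ?_
  intro i hi
  have hci : ∀ (L : List Int), i ∈ L → L.contains i = true := fun L h => by simpa using h
  have hca := hci _ hi
  rw [List.filter_filter]
  refine List.filter_congr ?_
  intro k hk
  cases hki : k.contains i with
  | false => simp
  | true =>
    have hik : i ∈ k := by simpa using hki
    have hklen : k.length ≤ 2 := pv_pairs_len pp k hk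
    match k, hklen with
    | [], _ => simp at hik
    | [a], _ =>
      have : i = a := by simpa using hik
      subst this
      simp_all [PySem.List.pyGetD_ofNat']
    | [a, b], _ =>
      rcases (by simpa using hik : i = a ∨ i = b) with rfl | rfl <;>
        simp_all [PySem.List.pyGetD_ofNat']

-- ---- B-side: the bucket-filling pass ----
theorem pv_bucket_foldl_contains (k : List Int) (v : Int) :
    ∀ (l : List Int) (st : PySem.Dict Int (List (List Int)) × List Int),
      ((l.foldl (fun st x => if st.1.contains x && !(st.2.contains x)
          then (st.1.modify x [] (fun t => t ++ [k]), st.2 ++ [x]) else st) st).1).contains v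
        = st.1.contains v := by
  intro l; induction l with
  | nil => intro st; rfl
  | cons x l ih =>
    intro st
    by_cases h : (st.1.contains x && !(st.2.contains x)) = true
    · rw [List.foldl_cons, if_pos h, ih]
      have hx : st.1.contains x = true := ((Bool.and_eq_true _ _).mp h).1
      rw [PySem.Dict.contains_modify]
      by_cases hv : v = x
      · subst hv; simp [hx]
      · simp [hv]
    · rw [List.foldl_cons, if_neg h, ih]

theorem pv_bucketPair_contains (d : PySem.Dict Int (List (List Int))) (k : List Int) (v : Int) :
    (pvBucketPair d k).contains v = d.contains v :=
  pv_bucket_foldl_contains k v k (d, [])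

theorem pv_bucketPair_getD (d : PySem.Dict Int (List (List Int))) (k : List Int)
    (hk : k.length ≤ 2) (v : Int) :
    (pvBucketPair d k).getD v [] =
      if d.contains v && k.contains v then d.getD v [] ++ [k] else d.getD v [] := by
  match k, hk with
  | [], _ => simp [pvBucketPair]
  | [a], _ =>
    unfold pvBucketPair
    simp only [List.foldl_cons, List.foldl_nil, List.contains_nil, Bool.not_false, Bool.and_true]
    by_cases ha : d.contains a = true
    · simp only [ha, if_true]
      rw [PySem.Dict.getD_modify]
      by_cases hv : v = a
      · subst hv; simp [ha]
      · simp [hv]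
    · simp only [ha]
      have ha' : d.contains a = false := by simpa using ha
      by_cases hv : v = a
      · subst hv; simp [ha']
      · simp [hv]
  | [a, b], _ =>
    unfold pvBucketPair
    simp only [List.foldl_cons, List.foldl_nil]
    by_cases ha : d.contains a = true <;> by_cases hb : d.contains b = true <;>
      by_cases hab : b = a <;> by_cases hva : v = a <;> by_cases hvb : v = b <;>
        simp_all [PySem.Dict.getD_modify, PySem.Dict.contains_modify]

theorem pv_buckets_foldl_getD (v : Int) :
    ∀ (ps : List (List Int)) (d : PySem.Dict Int (List (List Int))),
      (∀ k ∈ ps, k.length ≤ 2) →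
      (ps.foldl pvBucketPair d).getD v [] =
        d.getD v [] ++ ps.filter (fun k => d.contains v && k.contains v) := by
  intro ps; induction ps with
  | nil => intro d _; simp
  | cons k ps ih =>
    intro d h
    rw [List.foldl_cons, ih _ (fun k' hk' => h k' (List.mem_cons_of_mem _ hk'))]
    rw [pv_bucketPair_getD d k (h k List.mem_cons_self) v]
    simp only [pv_bucketPair_contains, List.filter_cons]
    by_cases hc : (d.contains v = true ∧ v ∈ k)
    · simp [hc]
    · simp [hc]

theorem pv_buckets0_getD (l : List Int) (v : Int) :
    ∀ (d : PySem.Dict Int (List (List Int))), d.getD v [] = [] →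
      (l.foldl (fun d w => d.insert w ([] : List (List Int))) d).getD v [] = [] := by
  induction l with
  | nil => intro d h; simpa using h
  | cons w l ih =>
    intro d h
    rw [List.foldl_cons]
    refine ih _ ?_
    rw [PySem.Dict.getD_insert]
    split <;> simp [h]

theorem pv_buckets0_contains (l : List Int) (v : Int) :
    (l.foldl (fun d w => d.insert w ([] : List (List Int))) PySem.Dict.empty).contains v
      = l.contains v := by
  have hkeys : (l.foldl (fun d w => d.insert w ([] : List (List Int))) PySem.Dict.empty).keys
      = PySem.Set.ofList l := by
    rw [PySem.Dict.keys_foldl_insert l (fun _ _ => ([] : List (List Int))) PySem.Dict.empty,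
        PySem.Dict.keys_empty]
    exact PySem.Set.update_empty l
  cases hb : l.contains v with
  | true =>
    rw [PySem.Dict.contains_iff_mem_keys, hkeys, PySem.Set.mem_ofList]
    simpa using hb
  | false =>
    rw [Bool.eq_false_iff]
    intro hc
    rw [PySem.Dict.contains_iff_mem_keys, hkeys, PySem.Set.mem_ofList] at hc
    simp_all

-- ---- B-side characterization ----
theorem pv_B (pp : List (List Int)) : multiplets_pairs_alt pp = pvOut pp := by
  unfold multiplets_pairs_alt
  simp only [pv_slice2]
  rw [show List.map (fun i => List.take 2 i) pp = pvPairs pp from rfl]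
  rw [← List.foldl_flatten]
  rw [show (pvPairs pp).flatten = pvFlat pp from rfl]
  have hkeys : ((pvFlat pp).foldl
      (fun (d : PySem.Dict Int Int) x => d.insert x (d.getD x 0 + 1)) PySem.Dict.empty).keys
      = PySem.Set.ofList (pvFlat pp) := by
    rw [PySem.Dict.keys_foldl_insert, PySem.Dict.keys_empty]
    exact PySem.Set.update_empty _
  have hcnt : ∀ w : Int, ((pvFlat pp).foldl
      (fun (d : PySem.Dict Int Int) x => d.insert x (d.getD x 0 + 1)) PySem.Dict.empty).getD w 0
      = ((pvFlat pp).count w : Int) := by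
    intro w
    rw [PySem.Dict.getD_foldl_insert_add_one, PySem.Dict.getD_empty]
    simp
  rw [hkeys]
  have hfilter : (PySem.Set.ofList (pvFlat pp)).filter
        (fun v => decide (((pvFlat pp).foldl
          (fun (d : PySem.Dict Int Int) x => d.insert x (d.getD x 0 + 1)) PySem.Dict.empty).getD v 0 > 1))
      = (PySem.Set.ofList (pvFlat pp)).filter (pvP pp) := by
    refine List.filter_congr ?_
    intro x _
    rw [hcnt x]
    unfold pvP
    simp only [gt_iff_lt, decide_eq_decide]
    exact_mod_cast Iff.rfl
  rw [hfilter]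
  unfold pvOut
  refine List.map_congr_left ?_
  intro v hv
  rw [pv_buckets_foldl_getD v (pvPairs pp) _ (pv_pairs_len pp)]
  rw [pv_buckets0_getD _ v PySem.Dict.empty (by simp)]
  rw [pv_buckets0_contains]
  have hv' : v ∈ pvFlat pp ∧ pvP pp v = true := by
    simpa [PySem.List.mem_sorted, List.mem_filter, PySem.Set.mem_ofList] using hv
  simp [hv'.1, hv'.2]

theorem pv_ports_eq (pp : List (List Int)) : multiplets_pairs pp = multiplets_pairs_alt pp :=
  (pv_A pp).trans (pv_B pp).symm

-- ===== VERDICT (by name: the statement is the Claim_ definition above) =====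
theorem multiplets_pairs_spec : Claim_equal_multiplets_pairs := by
  intro pp _ _
  unfold Spec_multiplets_pairs
  exact pv_ports_eq pp
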